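-- pv_equiv track=rewrite | github.com/MikeMitop/ParcialLenguajesC1 | 2/afd_id.py | afd_id
-- ===== SOURCE A (Python) =====
-- def afd_id(cadena):
--     estado = 0
--     if not cadena:
--         return False
--
--     for char in cadena:
--         if estado == 0:
--             if char.isalpha():
--                 estado = 1
--             else:
--                 estado = 2
--         elif estado == 1:
--             if char.isalnum():
--                 estado = 1
--             else:
--                 estado = 2
--         elif estado == 2:
--             break
--
--     return estado == 1
-- ===== SOURCE B (Python) =====
-- def afd_id(cadena):
--     if not cadena:
--         return False
--     return cadena[0].isalpha() and all(c.isalnum() for c in cadena[1:])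
-- ===== Notes on version B (the rewrite author's own statement) =====
-- stated objective: simpler
-- what changed: Replaces the explicit 3-state DFA loop with a direct boolean: first character isalpha, rest all isalnum (short-circuiting all).
import Mathlib
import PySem

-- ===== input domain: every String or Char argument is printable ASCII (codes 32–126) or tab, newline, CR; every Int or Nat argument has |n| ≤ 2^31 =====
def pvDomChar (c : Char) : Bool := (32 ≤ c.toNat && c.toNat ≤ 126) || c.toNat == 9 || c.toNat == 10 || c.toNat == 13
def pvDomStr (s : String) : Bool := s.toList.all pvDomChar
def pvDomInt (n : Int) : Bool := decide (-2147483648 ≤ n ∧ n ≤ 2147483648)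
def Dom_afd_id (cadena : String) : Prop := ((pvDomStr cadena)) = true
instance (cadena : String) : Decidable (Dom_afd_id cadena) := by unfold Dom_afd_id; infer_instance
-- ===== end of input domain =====

-- B replaces A's 3-state DFA loop with a direct boolean check (first char isalpha, tail all isalnum): simpler.

-- ===== PORT A =====
-- the DFA loop: 'break' at estado = 2 is the early return of the current estado
def afdLoop (estado : Int) : List Char → Int
  | [] => estado
  | c :: rest =>
    if estado == 0 then afdLoop (if PySem.Chars.isalpha c then 1 else 2) rest
    else if estado == 1 then afdLoop (if PySem.Chars.isalnum c then 1 else 2) rest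
    else estado

def afd_id (cadena : String) : Bool :=
  if cadena.toList.isEmpty then false
  else afdLoop 0 cadena.toList == 1

-- ===== PORT B =====
def afd_id_alt (cadena : String) : Bool :=
  match cadena.toList with
  | [] => false
  | c :: rest => PySem.Chars.isalpha c && rest.all PySem.Chars.isalnum

-- ===== PRECONDITION & SPEC =====
def Spec_afd_id (cadena : String) (out : Bool) : Prop := out = afd_id_alt cadena
instance (cadena : String) (out : Bool) : Decidable (Spec_afd_id cadena out) := by unfold Spec_afd_id; infer_instance

-- ===== CLAIM (what is proved, stated in full; the proofs are below) =====
def Claim_equal_afd_id : Prop := ∀ (cadena : String), Dom_afd_id cadena → Spec_afd_id cadena (afd_id cadena)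

-- ===== LEMMAS AND PROOFS =====
theorem afdLoop_one (rest : List Char) :
    (afdLoop 1 rest == 1) = rest.all PySem.Chars.isalnum := by
  induction rest with
  | nil => simp [afdLoop]
  | cons c rest ih =>
    simp only [afdLoop, List.all_cons]
    by_cases h : PySem.Chars.isalnum c = true
    · simp [h, ih]
    · simp only [Bool.not_eq_true] at h
      simp [h, afdLoop.eq_def]
      cases rest <;> simp [afdLoop]

-- ===== VERDICT (by name: the statement is the Claim_ definition above) =====
theorem afd_id_spec : Claim_equal_afd_id := by
  intro cadena _
  unfold Spec_afd_id afd_id afd_id_alt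
  cases h : cadena.toList with
  | nil => simp [h]
  | cons c rest =>
    simp only [List.isEmpty_cons, if_neg Bool.false_ne_true, afdLoop]
    by_cases ha : PySem.Chars.isalpha c = true
    · simp [ha, afdLoop_one]
    · simp only [Bool.not_eq_true] at ha
      simp [ha]
      cases rest <;> simp [afdLoop]
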